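-- pv_equiv track=rewrite | github.com/kristianwiklund/AOC | 2016/9/9.py | dc2lenh
-- ===== SOURCE A (Python) =====
-- def dc2lenh(sx,ack="0"):
--     S=sx.split("(",maxsplit=1)
--     if len(S)==2:
--         (s,sx)=S
--         (c,sx)=sx.split(")",maxsplit=1)
--         (cnt,rpt)=c.split("x")
--         cnt=int(cnt)
--         rpt=int(rpt)
--         ack+="+"+str(len(s))
--         it = sx[:cnt]
--         sx = sx[cnt:]
--
--         ack+="+ ("+dc2lenh(it)+")*"+str(rpt)
--         return dc2lenh(sx,ack=ack)
--
--     else: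
--         return ack+"+"+str(len(sx))
-- ===== SOURCE B (Python) =====
-- def _terms(s):
--     # list of "+"-separated terms of the length expression for s
--     i = s.find("(")
--     if i < 0:
--         return [str(len(s))]
--     j = s.index(")", i)
--     cnt, rpt = map(int, s[i + 1:j].split("x"))
--     rest = s[j + 1:]
--     inner = "0+" + "+".join(_terms(rest[:cnt]))
--     return [str(i), " (" + inner + ")*" + str(rpt)] + _terms(rest[cnt:])
--
--
-- def dc2lenh(sx, ack="0"):
--     # compositional: build the list of terms, join once
--     return ack + "+" + "+".join(_terms(sx))
-- ===== Notes on version B (the rewrite author's own statement) =====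
-- stated objective: alternative
-- what changed: A's outer tail recursion threading a growing accumulator string through repeated split(..., maxsplit=1) becomes a compositional helper that returns the list of terms of the length expression (via find, index and slicing), which dc2lenh joins once with the plus separator; the inner expression of a marker reuses the same helper instead of a recursive dc2lenh call.
import Mathlib
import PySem

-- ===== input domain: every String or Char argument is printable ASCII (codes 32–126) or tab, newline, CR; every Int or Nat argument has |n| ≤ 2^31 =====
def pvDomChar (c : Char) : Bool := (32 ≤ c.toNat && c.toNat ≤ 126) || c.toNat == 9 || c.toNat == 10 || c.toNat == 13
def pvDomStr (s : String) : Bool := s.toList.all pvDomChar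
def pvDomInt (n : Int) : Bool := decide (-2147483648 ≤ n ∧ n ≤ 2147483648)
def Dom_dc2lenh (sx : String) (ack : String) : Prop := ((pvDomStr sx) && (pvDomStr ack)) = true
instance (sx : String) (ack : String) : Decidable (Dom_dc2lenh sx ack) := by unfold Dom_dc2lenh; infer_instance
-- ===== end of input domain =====

-- B replaces A's accumulator-threading outer tail recursion by a compositional helper that
-- builds the list of "+"-separated terms of the expression and joins them once; objective: alternative.

-- characterisation of PySem.Chars.splitOnMax/find for a single-character separator, cited by the
-- ports' termination proofs (hence stated before the ports)
theorem pv_splitOnMax_go_zero (sep : List Char) (fuel : Nat) (l cur : List Char)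
    (acc : List (List Char)) :
    PySem.Chars.splitOnMax.go sep fuel 0 l cur acc = ((cur.reverse ++ l) :: acc).reverse := by
  cases fuel <;> cases l <;> simp [PySem.Chars.splitOnMax.go]

theorem pv_splitOnMax_go_one (a : Char) (fuel : Nat) :
    ∀ (l cur : List Char) (acc : List (List Char)), l.length < fuel →
    PySem.Chars.splitOnMax.go [a] fuel 1 l cur acc =
      acc.reverse ++
        (if a ∈ l then
          [cur.reverse ++ l.take ((l.takeWhile (· ≠ a)).length),
           l.drop ((l.takeWhile (· ≠ a)).length + 1)]
         else [cur.reverse ++ l]) := by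
  induction fuel with
  | zero => intro l cur acc h; omega
  | succ fuel ih =>
    intro l cur acc h
    cases l with
    | nil => simp [PySem.Chars.splitOnMax.go]
    | cons c rest =>
      by_cases hca : c = a
      · subst hca
        simp only [PySem.Chars.splitOnMax.go, List.isPrefixOf, BEq.rfl, Bool.true_and,
          if_true, if_neg (by omega : ¬ (1 : Nat) = 0)]
        rw [pv_splitOnMax_go_zero]
        simp [List.takeWhile]
      · have hpre : [a].isPrefixOf (c :: rest) = false := by
          simp [List.isPrefixOf]; exact fun hh => absurd hh.symm hca
        have htw : List.takeWhile (fun x => !decide (x = a)) (c :: rest)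
            = c :: List.takeWhile (fun x => !decide (x = a)) rest := by
          simp [hca]
        simp only [PySem.Chars.splitOnMax.go, hpre, if_neg (by omega : ¬ (1 : Nat) = 0)]
        rw [ih rest (c :: cur) acc (by simpa using Nat.lt_of_succ_lt_succ h)]
        by_cases hmem : a ∈ rest
        · have hm2 : a ∈ c :: rest := List.mem_cons_of_mem _ hmem
          simp [hmem, hm2, htw]
        · have hm2 : a ∉ c :: rest := by
            intro hc; rcases List.mem_cons.mp hc with h1 | h1
            · exact hca h1.symm
            · exact hmem h1
          simp [hmem, hm2]

theorem pv_splitOnMax_single (a : Char) (s : List Char) :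
    PySem.Chars.splitOnMax s [a] 1 =
      (if a ∈ s then
        [s.take ((s.takeWhile (· ≠ a)).length),
         s.drop ((s.takeWhile (· ≠ a)).length + 1)]
       else [s]) := by
  show PySem.Chars.splitOnMax.go [a] (s.length + 1) (1 : Int).toNat s [] [] = _
  rw [show (1 : Int).toNat = 1 from rfl,
    pv_splitOnMax_go_one a (s.length + 1) s [] [] (by omega)]
  simp

-- termination lemmas cited by the ports' decreasing_by (hence stated before the ports)
theorem pvACore_dec (s0 sx1 c rest sx : List Char) (a? b? : Option Int)
    (hS : PySem.Chars.splitOnMax sx ['('] 1 = [s0, sx1])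
    (hT : PySem.Chars.splitOnMax sx1 [')'] 1 = [c, rest]) :
    (PySem.List.slice rest a? b?).length < sx.length := by
  rw [pv_splitOnMax_single] at hS hT
  by_cases hm1 : '(' ∈ sx
  case neg => rw [if_neg hm1] at hS; simp at hS
  rw [if_pos hm1] at hS
  simp only [List.cons.injEq, and_true] at hS
  obtain ⟨hs0, hsx1⟩ := hS
  by_cases hm2 : ')' ∈ sx1
  case neg => rw [if_neg hm2] at hT; simp at hT
  rw [if_pos hm2] at hT
  simp only [List.cons.injEq, and_true] at hT
  obtain ⟨hc, hrest⟩ := hT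
  have hpos : 0 < sx.length := List.length_pos_iff.mpr (List.ne_nil_of_mem hm1)
  have h1 : sx1.length < sx.length := by
    rw [← hsx1]; simp [List.length_drop]; omega
  have h2 : rest.length ≤ sx1.length := by rw [← hrest]; simp [List.length_drop]
  have h3 := PySem.List.length_slice_le rest a? b?
  omega

theorem pvTerms_dec (s : List Char) (a? b? : Option Int)
    (hi : ¬ PySem.Chars.find s ['('] < 0)
    (hj : ¬ PySem.Chars.findFrom s [')'] (PySem.Chars.find s ['(']) none < 0) :
    (PySem.List.slice (PySem.List.slice s
      (some (PySem.Chars.findFrom s [')'] (PySem.Chars.find s ['(']) none + 1)) none) a? b?).length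
      < s.length := by
  have hne : s ≠ [] := by
    rintro rfl; exact hi (by decide)
  have hpos : 0 < s.length := List.length_pos_iff.mpr hne
  have hcast : PySem.Chars.findFrom s [')'] (PySem.Chars.find s ['(']) none + 1
      = (((PySem.Chars.findFrom s [')'] (PySem.Chars.find s ['(']) none).toNat + 1 : Nat) : Int) := by
    omega
  have hrest : (PySem.List.slice s (some (PySem.Chars.findFrom s [')']
      (PySem.Chars.find s ['(']) none + 1)) none).length < s.length := by
    rw [hcast, PySem.List.slice_from_natCast]
    simp [List.length_drop]; omega
  exact lt_of_le_of_lt (PySem.List.length_slice_le _ _ _) hrest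

-- ===== PORT A =====
-- step-for-step port of A on List Char: split(…, maxsplit=1) twice, split("x"), int(), slices,
-- accumulator string threaded through the tail call; catch-alls return [] exactly where Python raises
def pvACore (sx ack : List Char) : List Char :=
  match hS : PySem.Chars.splitOnMax sx ['('] 1 with
  | [s0, sx1] =>
    match hT : PySem.Chars.splitOnMax sx1 [')'] 1 with
    | [c, rest] =>
      match PySem.Chars.splitOn c ['x'] with
      | [cs, rs] =>
        match PySem.Int.ofChars? cs, PySem.Int.ofChars? rs with
        | some cnt, some rpt =>
          let ack2 := ack ++ ['+'] ++ PySem.Int.toChars (s0.length : Int)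
          let it := PySem.List.slice rest none (some cnt)
          let rest2 := PySem.List.slice rest (some cnt) none
          let ack3 := ack2 ++ ("+ (".toList ++ pvACore it "0".toList ++ ")*".toList
                        ++ PySem.Int.toChars rpt)
          pvACore rest2 ack3
        | _, _ => []   -- Python: ValueError from int()
      | _ => []        -- Python: unpack of c.split("x") fails
    | _ => []          -- Python: unpack of sx.split(")", 1) fails
  | _ => ack ++ ['+'] ++ PySem.Int.toChars (sx.length : Int)
termination_by sx.length
decreasing_by
  all_goals exact pvACore_dec _ _ _ _ _ _ _ hS hT

def dc2lenh (sx : String) (ack : String) : String :=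
  String.mk (pvACore sx.toList ack.toList)

-- ===== PORT B =====
-- port of B: _terms builds the list of "+"-separated terms via find / index(")", i) / absolute
-- slices, recursing structurally (not tail-recursively, no accumulator); dc2lenh_alt joins once.
-- catch-alls return [] exactly where Python raises (index() or int() ValueError)
def pvTerms (s : List Char) : List (List Char) :=
  let i := PySem.Chars.find s ['(']
  if hi : i < 0 then
    [PySem.Int.toChars (s.length : Int)]
  else
    let j := PySem.Chars.findFrom s [')'] i none
    if hj : j < 0 then []   -- Python: ValueError from s.index(")", i)
    else
      match PySem.Chars.splitOn (PySem.List.slice s (some (i + 1)) (some j)) ['x'] with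
      | [cs, rs] =>
        match PySem.Int.ofChars? cs, PySem.Int.ofChars? rs with
        | some cnt, some rpt =>
          let rest := PySem.List.slice s (some (j + 1)) none
          let inner := "0+".toList
            ++ PySem.Chars.join ['+'] (pvTerms (PySem.List.slice rest none (some cnt)))
          [PySem.Int.toChars i, " (".toList ++ inner ++ ")*".toList ++ PySem.Int.toChars rpt]
            ++ pvTerms (PySem.List.slice rest (some cnt) none)
        | _, _ => []   -- Python: ValueError from int()
      | _ => []        -- Python: unpack of map(int, …) over a non-pair fails
termination_by s.length
decreasing_by
  all_goals exact pvTerms_dec _ _ _ hi hj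

def dc2lenh_alt (sx : String) (ack : String) : String :=
  String.mk (ack.toList ++ ['+'] ++ PySem.Chars.join ['+'] (pvTerms sx.toList))

-- ===== PRECONDITION & SPEC =====
-- grammar of well-formed compressed strings: every marker reached by the scan is "(", an int, "x",
-- an int, ")" — exactly the inputs on which Python A returns normally (elsewhere A raises
-- ValueError from tuple unpacking or int()); ack never causes a raise, so it is unconstrained.
-- The structural fuel argument only makes the grammar check kernel-computable; pvWf always
-- supplies s.length + 1, which pvWfF_congr (below) shows is enough.
def pvWfF : Nat → List Char → Bool
  | 0, _ => true
  | f + 1, s =>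
    if '(' ∈ s then
      let r := s.drop ((s.takeWhile (· ≠ '(')).length + 1)
      if ')' ∈ r then
        let c := r.take ((r.takeWhile (· ≠ ')')).length)
        let r2 := r.drop ((r.takeWhile (· ≠ ')')).length + 1)
        match PySem.Chars.splitOn c ['x'] with
        | [cs, rs] =>
          match PySem.Int.ofChars? cs, PySem.Int.ofChars? rs with
          | some cnt, some _ =>
            pvWfF f (PySem.List.slice r2 none (some cnt)) && pvWfF f (PySem.List.slice r2 (some cnt) none)
          | _, _ => false
        | _ => false
      else false
    else true

def pvWf (s : List Char) : Bool := pvWfF (s.length + 1) s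

def Pre_dc2lenh (sx : String) (ack : String) : Prop := pvWf sx.toList = true
instance (sx : String) (ack : String) : Decidable (Pre_dc2lenh sx ack) := by unfold Pre_dc2lenh; infer_instance

def pvWitness_dc2lenh : String × String := ("ab", "0")

def Spec_dc2lenh (sx : String) (ack : String) (out : String) : Prop := out = dc2lenh_alt sx ack
instance (sx : String) (ack : String) (out : String) : Decidable (Spec_dc2lenh sx ack out) := by unfold Spec_dc2lenh; infer_instance

-- ===== CLAIM (what is proved, stated in full; the proofs are below) =====
def Claim_equal_dc2lenh : Prop := ∀ (sx : String) (ack : String), Dom_dc2lenh sx ack → Pre_dc2lenh sx ack → Spec_dc2lenh sx ack (dc2lenh sx ack)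

-- ===== LEMMAS AND PROOFS =====

theorem pv_find_go_single (a : Char) :
    ∀ (l : List Char) (k : Nat),
    PySem.Chars.find.go [a] l k =
      (if a ∈ l then ((k + (l.takeWhile (· ≠ a)).length : Nat) : Int) else -1) := by
  intro l
  induction l with
  | nil => intro k; simp [PySem.Chars.find.go]
  | cons c rest ih =>
    intro k
    by_cases hca : c = a
    · subst hca
      simp [PySem.Chars.find.go, List.isPrefixOf, List.takeWhile]
    · have hpre : [a].isPrefixOf (c :: rest) = false := by
        simp [List.isPrefixOf]; exact fun hh => absurd hh.symm hca
      have htw : List.takeWhile (fun x => !decide (x = a)) (c :: rest)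
          = c :: List.takeWhile (fun x => !decide (x = a)) rest := by
        simp [hca]
      simp only [PySem.Chars.find.go, hpre, Bool.false_eq_true, if_false, ih (k + 1)]
      by_cases hmem : a ∈ rest
      · have hm2 : a ∈ c :: rest := List.mem_cons_of_mem _ hmem
        simp [hmem, hm2, htw]; ring
      · have hm2 : a ∉ c :: rest := by
          intro hc; rcases List.mem_cons.mp hc with h1 | h1
          · exact hca h1.symm
          · exact hmem h1
        simp [hmem, hm2]

theorem pv_find_single (a : Char) (s : List Char) :
    PySem.Chars.find s [a] =
      (if a ∈ s then (((s.takeWhile (· ≠ a)).length : Nat) : Int) else -1) := by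
  show PySem.Chars.find.go [a] s 0 = _
  rw [pv_find_go_single a s 0]
  simp


theorem pv_drop_first (a : Char) (s : List Char) (h : a ∈ s) :
    s.drop ((s.takeWhile (· ≠ a)).length) = a :: s.drop ((s.takeWhile (· ≠ a)).length + 1) := by
  induction s with
  | nil => cases h
  | cons c t ih =>
    by_cases hc : c = a
    · subst hc
      simp [List.takeWhile_cons]
    · have ha : a ∈ t := by
        rcases List.mem_cons.mp h with h1 | h1
        · exact absurd h1.symm hc
        · exact h1
      have htw : (c :: t).takeWhile (fun x => decide (x ≠ a))
          = c :: t.takeWhile (fun x => decide (x ≠ a)) := by simp [hc]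
      simp only [ne_eq, decide_not] at htw ⊢
      rw [htw]
      simpa using ih ha

-- the fuel of pvWfF is irrelevant once it exceeds the length of the string
theorem pvWfF_congr (n : Nat) : ∀ (f g : Nat) (s : List Char),
    s.length ≤ n → s.length < f → s.length < g → pvWfF f s = pvWfF g s := by
  induction n with
  | zero =>
    intro f g s hn hf hg
    have hnil : s = [] := List.eq_nil_of_length_eq_zero (Nat.le_zero.mp hn)
    subst hnil
    cases f with
    | zero => omega
    | succ f =>
      cases g with
      | zero => omega
      | succ g => simp [pvWfF]
  | succ n ih =>
    intro f g s hn hf hg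
    cases f with
    | zero => omega
    | succ f =>
      cases g with
      | zero => omega
      | succ g =>
        rw [pvWfF, pvWfF]
        by_cases hm : '(' ∈ s
        · simp only [if_pos hm]
          have hpos : 0 < s.length := List.length_pos_iff.mpr (List.ne_nil_of_mem hm)
          split_ifs with hm2
          · split
            · split
              · rename_i cnt rpt hcs hrs
                have hb : ∀ (a? b? : Option Int),
                    (PySem.List.slice ((s.drop ((s.takeWhile (· ≠ '(')).length + 1)).drop
                      (((s.drop ((s.takeWhile (· ≠ '(')).length + 1)).takeWhile (· ≠ ')')).length + 1)) a? b?).length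
                      < s.length := by
                  intro a? b?
                  refine lt_of_le_of_lt (PySem.List.length_slice_le _ _ _) ?_
                  simp only [List.length_drop]
                  omega
                rw [ih f g (PySem.List.slice ((s.drop ((s.takeWhile (· ≠ '(')).length + 1)).drop (((s.drop ((s.takeWhile (· ≠ '(')).length + 1)).takeWhile (· ≠ ')')).length + 1)) none (some cnt))
                      (by have := hb none (some cnt); omega) (by have := hb none (some cnt); omega)
                      (by have := hb none (some cnt); omega),
                    ih f g (PySem.List.slice ((s.drop ((s.takeWhile (· ≠ '(')).length + 1)).drop (((s.drop ((s.takeWhile (· ≠ '(')).length + 1)).takeWhile (· ≠ ')')).length + 1)) (some cnt) none)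
                      (by have := hb (some cnt) none; omega) (by have := hb (some cnt) none; omega)
                      (by have := hb (some cnt) none; omega)]
              · rfl
            · rfl
          · rfl
        · simp [hm]

theorem pvWf_fuel (s : List Char) (f : Nat) (hf : s.length < f) : pvWfF f s = pvWf s :=
  pvWfF_congr s.length f (s.length + 1) s le_rfl hf (by omega)

-- inversion of the well-formedness grammar at a string containing '('
theorem pvWf_inv (s : List Char) (h : pvWf s = true) (hm : '(' ∈ s) :
    ∃ cs rs cnt rpt,
      ')' ∈ s.drop ((s.takeWhile (· ≠ '(')).length + 1) ∧
      PySem.Chars.splitOn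
        ((s.drop ((s.takeWhile (· ≠ '(')).length + 1)).take
          (((s.drop ((s.takeWhile (· ≠ '(')).length + 1)).takeWhile (· ≠ ')')).length)) ['x'] = [cs, rs] ∧
      PySem.Int.ofChars? cs = some cnt ∧ PySem.Int.ofChars? rs = some rpt ∧
      pvWf (PySem.List.slice ((s.drop ((s.takeWhile (· ≠ '(')).length + 1)).drop
          (((s.drop ((s.takeWhile (· ≠ '(')).length + 1)).takeWhile (· ≠ ')')).length + 1)) none (some cnt)) = true ∧
      pvWf (PySem.List.slice ((s.drop ((s.takeWhile (· ≠ '(')).length + 1)).drop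
          (((s.drop ((s.takeWhile (· ≠ '(')).length + 1)).takeWhile (· ≠ ')')).length + 1)) (some cnt) none) = true := by
  have hpos : 0 < s.length := List.length_pos_iff.mpr (List.ne_nil_of_mem hm)
  have hb : ∀ (a? b? : Option Int),
      (PySem.List.slice ((s.drop ((s.takeWhile (· ≠ '(')).length + 1)).drop
        (((s.drop ((s.takeWhile (· ≠ '(')).length + 1)).takeWhile (· ≠ ')')).length + 1)) a? b?).length
        < s.length := by
    intro a? b?
    refine lt_of_le_of_lt (PySem.List.length_slice_le _ _ _) ?_
    simp only [List.length_drop]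
    omega
  rw [pvWf.eq_1, pvWfF.eq_2, if_pos hm] at h
  simp only [] at h
  split_ifs at h with hm2
  split at h
  case h_2 => exact absurd h (by simp)
  case h_1 cs rs hsplit =>
    split at h
    case h_2 => exact absurd h (by simp)
    case h_1 cnt rpt hcs hrs =>
      rw [Bool.and_eq_true, pvWf_fuel _ _ (hb none (some cnt)), pvWf_fuel _ _ (hb (some cnt) none)] at h
      exact ⟨cs, rs, cnt, rpt, hm2, hsplit, hcs, hrs, h.1, h.2⟩

-- A only ever appends to its accumulator (on well-formed input)
theorem pvACore_ack (n : Nat) : ∀ (s : List Char), s.length ≤ n → pvWf s = true →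
    ∀ (ack : List Char), pvACore s ack = ack ++ pvACore s [] := by
  induction n with
  | zero =>
    intro s hs _ ack
    have hnil : s = [] := List.eq_nil_of_length_eq_zero (Nat.le_zero.mp hs)
    subst hnil
    rw [pvACore.eq_def, pvACore.eq_def]
    rw [show PySem.Chars.splitOnMax [] ['('] 1 = [[]] from rfl]
    simp
  | succ n ih =>
    intro s hs hwf ack
    by_cases hm : '(' ∈ s
    · obtain ⟨cs, rs, cnt, rpt, hm2, hsplit, hcs, hrs, hw1, hw2⟩ := pvWf_inv s hwf hm
      rw [pvACore.eq_def, pvACore.eq_def]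
      rw [pv_splitOnMax_single, if_pos hm]
      simp only
      rw [pv_splitOnMax_single, if_pos hm2]
      simp only
      rw [hsplit]
      simp only
      rw [hcs, hrs]
      simp only
      have hpos : 0 < s.length := List.length_pos_iff.mpr (List.ne_nil_of_mem hm)
      have hlen : (PySem.List.slice ((s.drop ((s.takeWhile (· ≠ '(')).length + 1)).drop
          (((s.drop ((s.takeWhile (· ≠ '(')).length + 1)).takeWhile (· ≠ ')')).length + 1)) (some cnt) none).length ≤ n := by
        have h1 := PySem.List.length_slice_le ((s.drop ((s.takeWhile (· ≠ '(')).length + 1)).drop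
          (((s.drop ((s.takeWhile (· ≠ '(')).length + 1)).takeWhile (· ≠ ')')).length + 1)) (some cnt) none
        simp only [List.length_drop] at h1 ⊢
        omega
      have e := ih _ hlen hw2
      conv_lhs => rw [e]
      conv_rhs => rw [e]
      simp
    · rw [pvACore.eq_def, pvACore.eq_def]
      rw [pv_splitOnMax_single, if_neg hm]
      simp

-- A's result (empty accumulator) is "+" followed by B's joined term list, and the term list
-- is never empty on well-formed input
theorem pv_main (n : Nat) : ∀ (s : List Char), s.length ≤ n → pvWf s = true →
    pvACore s [] = ['+'] ++ PySem.Chars.join ['+'] (pvTerms s) ∧ pvTerms s ≠ [] := by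
  induction n with
  | zero =>
    intro s hs _
    have hnil : s = [] := List.eq_nil_of_length_eq_zero (Nat.le_zero.mp hs)
    subst hnil
    constructor
    · rw [pvACore.eq_def, pvTerms.eq_def]
      rw [show PySem.Chars.splitOnMax [] ['('] 1 = [[]] from rfl]
      rw [show PySem.Chars.find ([] : List Char) ['('] = -1 from rfl]
      rw [dif_pos (by norm_num : (-1 : Int) < 0), PySem.Chars.join_singleton]
      simp
    · rw [pvTerms.eq_def]
      rw [show PySem.Chars.find ([] : List Char) ['('] = -1 from rfl]
      rw [dif_pos (by norm_num : (-1 : Int) < 0)]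
      simp
  | succ n ih =>
    intro s hs hwf
    by_cases hm : '(' ∈ s
    case neg =>
      have hfind : PySem.Chars.find s ['('] = -1 := by rw [pv_find_single, if_neg hm]
      constructor
      · rw [pvACore.eq_def, pvTerms.eq_def, pv_splitOnMax_single, if_neg hm, hfind]
        rw [dif_pos (by norm_num : (-1 : Int) < 0), PySem.Chars.join_singleton]
        simp
      · rw [pvTerms.eq_def, hfind, dif_pos (by norm_num : (-1 : Int) < 0)]
        simp
    case pos =>
      obtain ⟨cs, rs, cnt, rpt, hm2, hsplit, hcs, hrs, hw1, hw2⟩ := pvWf_inv s hwf hm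
      have hpos : 0 < s.length := List.length_pos_iff.mpr (List.ne_nil_of_mem hm)
      have htw1le : (s.takeWhile (· ≠ '(')).length ≤ s.length :=
        (List.takeWhile_sublist _).length_le
      -- abbreviations (definitional)
      set tw1 := (s.takeWhile (· ≠ '(')).length with htw1
      set r := s.drop (tw1 + 1) with hr
      set tw2 := (r.takeWhile (· ≠ ')')).length with htw2
      set r2 := r.drop (tw2 + 1) with hr2
      have hfind : PySem.Chars.find s ['('] = (tw1 : Int) := by
        rw [pv_find_single, if_pos hm]
      have hdropfirst : s.drop tw1 = '(' :: r := pv_drop_first '(' s hm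
      have hm2' : ')' ∈ '(' :: r := List.mem_cons_of_mem _ hm2
      have hfr : PySem.Chars.find (s.drop tw1) [')'] = ((1 + tw2 : Nat) : Int) := by
        rw [hdropfirst, pv_find_single, if_pos hm2']
        congr 1
        simp [htw2]
        omega
      have hfindfrom : PySem.Chars.findFrom s [')'] ((tw1 : Nat) : Int) none
          = ((tw1 + 1 + tw2 : Nat) : Int) := by
        rw [PySem.Chars.findFrom_natCast s [')'] tw1 htw1le, hfr]
        rw [if_neg (by omega : ¬ ((1 + tw2 : Nat) : Int) = -1)]
        push_cast
        ring
      have hcslice : PySem.List.slice s (some ((tw1 : Int) + 1)) (some ((tw1 + 1 + tw2 : Nat) : Int))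
          = r.take tw2 := by
        rw [show ((tw1 : Int) + 1) = ((tw1 + 1 : Nat) : Int) by push_cast; ring,
          PySem.List.slice_natCast, hr]
        congr 1
        omega
      have hrestslice : PySem.List.slice s (some (((tw1 + 1 + tw2 : Nat) : Int) + 1)) none = r2 := by
        rw [show (((tw1 + 1 + tw2 : Nat) : Int) + 1) = ((tw1 + 1 + tw2 + 1 : Nat) : Int) by push_cast; ring,
          PySem.List.slice_from_natCast, hr2, hr, List.drop_drop]
        congr 1
      -- lengths of the two sub-problems
      have hlen2 : r2.length < s.length := by
        rw [hr2, hr]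
        simp only [List.length_drop]
        omega
      have hlit : (PySem.List.slice r2 none (some cnt)).length ≤ n :=
        le_trans (le_trans (PySem.List.length_slice_le _ _ _) (Nat.le_of_lt_succ (lt_of_lt_of_le hlen2 hs))) (le_refl n)
      have hlrest : (PySem.List.slice r2 (some cnt) none).length ≤ n :=
        le_trans (PySem.List.length_slice_le _ _ _) (Nat.le_of_lt_succ (lt_of_lt_of_le hlen2 hs))
      obtain ⟨e1, -⟩ := ih (PySem.List.slice r2 none (some cnt)) hlit hw1
      obtain ⟨e2, hne2⟩ := ih (PySem.List.slice r2 (some cnt) none) hlrest hw2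
      obtain ⟨t, ts, ht⟩ := List.exists_cons_of_ne_nil hne2
      have hack1 := pvACore_ack n (PySem.List.slice r2 none (some cnt)) hlit hw1 "0".toList
      have hack2 := pvACore_ack n (PySem.List.slice r2 (some cnt) none) hlrest hw2
      -- unfold B one step
      have hB : pvTerms s =
          [PySem.Int.toChars (tw1 : Int),
           " (".toList ++ ("0+".toList ++ PySem.Chars.join ['+'] (pvTerms (PySem.List.slice r2 none (some cnt))))
             ++ ")*".toList ++ PySem.Int.toChars rpt]
            ++ pvTerms (PySem.List.slice r2 (some cnt) none) := by
        rw [pvTerms.eq_def, hfind]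
        rw [dif_neg (by omega : ¬ ((tw1 : Nat) : Int) < 0)]
        rw [hfindfrom]
        rw [dif_neg (by omega : ¬ ((tw1 + 1 + tw2 : Nat) : Int) < 0)]
        rw [hcslice, hsplit]
        simp only
        rw [hcs, hrs]
        simp only
        rw [hrestslice]
      -- unfold A one step
      have hA : pvACore s [] =
          (([] : List Char) ++ ['+'] ++ PySem.Int.toChars ((s.take tw1).length : Int))
            ++ ("+ (".toList ++ pvACore (PySem.List.slice r2 none (some cnt)) "0".toList ++ ")*".toList
                ++ PySem.Int.toChars rpt)
            ++ pvACore (PySem.List.slice r2 (some cnt) none) [] := by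
        rw [pvACore.eq_def, pv_splitOnMax_single, if_pos hm]
        simp only
        rw [pv_splitOnMax_single, if_pos hm2]
        simp only
        rw [hsplit]
        simp only
        rw [hcs, hrs]
        simp only
        rw [pvACore_ack n (PySem.List.slice r2 (some cnt) none) hlrest hw2]
      have hlentake : (s.take tw1).length = tw1 := by
        simp [List.length_take]
        omega
      constructor
      · rw [hA, hB, hack1, e1, e2, ht, hlentake]
        rw [show ("0+".toList : List Char) = ['0', '+'] from rfl,
          show ("0".toList : List Char) = ['0'] from rfl,
          show ("+ (".toList : List Char) = ['+', ' ', '('] from rfl,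
          show (" (".toList : List Char) = [' ', '('] from rfl]
        simp only [List.cons_append, List.nil_append]
        rw [PySem.Chars.join_cons_cons, PySem.Chars.join_cons_cons]
        simp [List.append_assoc]
      · rw [hB]
        simp


-- ===== VERDICT =====
theorem dc2lenh_spec : Claim_equal_dc2lenh := by
  intro sx ack _ hpre
  unfold Spec_dc2lenh dc2lenh dc2lenh_alt
  have hw : pvWf sx.toList = true := hpre
  rw [pvACore_ack sx.toList.length sx.toList le_rfl hw ack.toList,
    (pv_main sx.toList.length sx.toList le_rfl hw).1]
  simp
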